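-- pv_equiv track=rewrite | github.com/imsure/tech-interview-prep | py/leetcode_py/777.py | canTransform2
-- ===== SOURCE A (Python) =====
-- def canTransform2(start, end):
--     """
--     A much improved solution: one pass + no extra space
--
--     Position two pointers i and j at the beginning of `start` and `end`.
--     Advance both pointers as long as the element they point to is 'X'. Stop advancing
--     when either 'L' or 'R' is encountered.
--
--     The following cases are enumerated:
--     - i == j == len(start), return True
--     - start[i] == end[j]
--       * start[i] == end[j] == 'L',
--         if i >= j, i += 1, j += 1, otherwise return False because 'L' can only move leftwards.
--       * start[i] == end[j] == 'R',
--         if i <= j, i += 1, j += 1, otherwise return False because 'R' can only move rightwords.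
--     - start[i] != end[j], return False,
--       because this means some 'L' and some 'R' in `start` must cross each other to transform to `end`.
--
--     :param start:
--     :param end:
--     :return:
--     """
--     m, n = len(start), len(end)
--     if m != n:
--         return False
--
--     i = j = 0
--     while True:
--         while i < n and start[i] == 'X':
--             i += 1
--         while j < n and end[j] == 'X':
--             j += 1
--
--         if i == j == n:
--             return True
--         elif i == n or j == n:
--             return False
--
--         if start[i] == end[j] == 'L':
--             if i >= j:
--                 i += 1
--                 j += 1
--             else:
--                 return False
--         elif start[i] == end[j] == 'R':
--             if i <= j:
--                 i += 1
--                 j += 1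
--             else:
--                 return False
--         else:
--             return False
-- ===== SOURCE B (Python) =====
-- def canTransform2(start, end):
--     if len(start) != len(end):
--         return False
--     S = [(c, i) for i, c in enumerate(start) if c != 'X']
--     T = [(c, i) for i, c in enumerate(end) if c != 'X']
--     if len(S) != len(T):
--         return False
--     for (cs, si), (ce, ei) in zip(S, T):
--         if cs != ce:
--             return False
--         if cs == 'L':
--             if si < ei:
--                 return False
--         elif cs == 'R':
--             if si > ei:
--                 return False
--         else:
--             return False
--     return True
-- ===== Notes on version B (the rewrite author's own statement) =====
-- stated objective: alternative
-- what changed: Replaces A's two-pointer while-loop that skips 'X' on the fly with two filtered (char,index) lists built up front and a single zip pass checking char equality and L/R index order.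
import Mathlib
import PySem

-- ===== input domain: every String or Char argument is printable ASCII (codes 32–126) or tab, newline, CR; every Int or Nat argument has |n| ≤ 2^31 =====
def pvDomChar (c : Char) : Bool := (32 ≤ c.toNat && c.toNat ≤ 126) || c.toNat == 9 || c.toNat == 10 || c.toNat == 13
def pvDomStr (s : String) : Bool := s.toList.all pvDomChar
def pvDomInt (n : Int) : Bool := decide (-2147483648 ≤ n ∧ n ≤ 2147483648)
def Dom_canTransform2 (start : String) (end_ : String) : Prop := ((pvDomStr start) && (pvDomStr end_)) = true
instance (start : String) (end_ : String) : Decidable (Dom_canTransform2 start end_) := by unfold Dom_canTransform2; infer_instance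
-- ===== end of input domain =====

-- B replaces A's two-pointer X-skipping while-loop by two up-front filtered (char,index)
-- lists zipped in one pass; alternative decomposition, same asymptotic cost.

-- ===== PORT A =====
-- inner 'while i < n and start[i] == X: i += 1'
def pvSkipX (l : List Char) (n i : Nat) : Nat :=
  if h : i < n ∧ l.getD i ' ' = 'X' then pvSkipX l n (i + 1) else i
termination_by n - i
decreasing_by omega

theorem pvSkipX_ge (l : List Char) (n i : Nat) : i ≤ pvSkipX l n i := by
  fun_induction pvSkipX l n i with
  | case1 => omega
  | case2 => omega

-- the outer 'while True' loop of A
def pvLoopA (sl el : List Char) (n i j : Nat) : Bool :=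
  let i' := pvSkipX sl n i
  let j' := pvSkipX el n j
  if i' = j' ∧ j' = n then true
  else if i' = n ∨ j' = n then false
  else if h1 : sl.getD i' ' ' = el.getD j' ' ' ∧ el.getD j' ' ' = 'L' then
    if i' ≥ j' then pvLoopA sl el n (i' + 1) (j' + 1) else false
  else if h2 : sl.getD i' ' ' = el.getD j' ' ' ∧ el.getD j' ' ' = 'R' then
    if i' ≤ j' then pvLoopA sl el n (i' + 1) (j' + 1) else false
  else false
termination_by (sl.length - i) + (el.length - j)
decreasing_by
  all_goals
    have hi := pvSkipX_ge sl n i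
    have hj := pvSkipX_ge el n j
    have hiL : pvSkipX sl n i < sl.length := by
      by_contra hc
      first
        | (rw [List.getD_eq_default sl ' ' (by omega)] at h1
           exact absurd (h1.1.trans h1.2) (by decide))
        | (rw [List.getD_eq_default sl ' ' (by omega)] at h2
           exact absurd (h2.1.trans h2.2) (by decide))
    have hjL : pvSkipX el n j < el.length := by
      by_contra hc
      first
        | (rw [List.getD_eq_default el ' ' (by omega)] at h1
           exact absurd h1.2 (by decide))
        | (rw [List.getD_eq_default el ' ' (by omega)] at h2
           exact absurd h2.2 (by decide))
    omega

def canTransform2 (start : String) (end_ : String) : Bool :=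
  let sl := start.toList
  let el := end_.toList
  if sl.length ≠ el.length then false
  else pvLoopA sl el el.length 0 0

-- ===== PORT B =====
-- the comprehension body '(c, i) for i, c in enumerate(...) if c != X'
def pvPick (p : Int × Char) : Option (Char × Int) :=
  if p.2 ≠ 'X' then some (p.2, p.1) else none

def canTransform2_alt (start : String) (end_ : String) : Bool :=
  if start.toList.length ≠ end_.toList.length then false
  else
    let S := (PySem.List.enumerate start.toList 0).filterMap pvPick
    let T := (PySem.List.enumerate end_.toList 0).filterMap pvPick
    if S.length ≠ T.length then false
    else (S.zip T).all (fun q =>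
      if q.1.1 ≠ q.2.1 then false
      else if q.1.1 = 'L' then (if q.1.2 < q.2.2 then false else true)
      else if q.1.1 = 'R' then (if q.1.2 > q.2.2 then false else true)
      else false)

-- ===== PRECONDITION & SPEC =====
def Spec_canTransform2 (start : String) (end_ : String) (out : Bool) : Prop := out = canTransform2_alt start end_
instance (start : String) (end_ : String) (out : Bool) : Decidable (Spec_canTransform2 start end_ out) := by unfold Spec_canTransform2; infer_instance

-- ===== CLAIM (what is proved, stated in full; the proofs are below) =====
def Claim_equal_canTransform2 : Prop := ∀ (start : String) (end_ : String), Dom_canTransform2 start end_ → Spec_canTransform2 start end_ (canTransform2 start end_)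

-- ===== LEMMAS AND PROOFS =====

-- the non-'X' characters of l paired with their positions, positions starting at s
def fIdxL : List Char → Int → List (Char × Int)
  | [], _ => []
  | c :: t, s => if c = 'X' then fIdxL t (s + 1) else (c, s) :: fIdxL t (s + 1)

-- lock-step check of the two filtered lists (reference form shared by both proofs)
def chk : List (Char × Int) → List (Char × Int) → Bool
  | [], [] => true
  | [], _ :: _ => false
  | _ :: _, [] => false
  | (cs, si) :: S, (ce, ei) :: T =>
    if cs = ce ∧ ce = 'L' then (decide (si ≥ ei)) && chk S T
    else if cs = ce ∧ ce = 'R' then (decide (si ≤ ei)) && chk S T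
    else false

theorem enumFilt (l : List Char) (s : Int) :
    (PySem.List.enumerate l s).filterMap pvPick = fIdxL l s := by
  induction l generalizing s with
  | nil => simp [PySem.List.enumerate_nil, fIdxL]
  | cons c t ih =>
    rw [PySem.List.enumerate_cons, List.filterMap_cons]
    by_cases hc : c = 'X'
    · rw [show pvPick (s, c) = none from by simp [pvPick, hc], ih]
      simp [fIdxL, hc]
    · rw [show pvPick (s, c) = some (c, s) from by simp [pvPick, hc], ih]
      simp [fIdxL, hc]

theorem pvSkipX_le (l : List Char) (n i : Nat) : i ≤ n → pvSkipX l n i ≤ n := by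
  fun_induction pvSkipX l n i with
  | case1 i hc ih => exact fun _ => ih (by omega)
  | case2 i hc => exact fun h => h

theorem skip_stop (l : List Char) (n i : Nat) :
    ¬ (pvSkipX l n i < n ∧ l.getD (pvSkipX l n i) ' ' = 'X') := by
  fun_induction pvSkipX l n i with
  | case1 i h ih => exact ih
  | case2 i h => exact h

theorem skip_fIdx (l : List Char) (n i : Nat) :
    fIdxL (l.drop (pvSkipX l n i)) (pvSkipX l n i) = fIdxL (l.drop i) i := by
  fun_induction pvSkipX l n i with
  | case1 i h ih =>
    rw [ih]
    have hlen : i < l.length := by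
      by_contra hc
      rw [List.getD_eq_default _ _ (by omega)] at h
      exact absurd h.2 (by decide)
    rw [List.drop_eq_getElem_cons hlen, fIdxL]
    have hx : l[i] = 'X' := by
      have := h.2
      rwa [List.getD_eq_getElem _ ' ' hlen] at this
    simp [hx]
  | case2 => rfl

theorem fIdx_cons (l : List Char) (i : Nat) (hi : i < l.length)
    (hx : l.getD i ' ' ≠ 'X') :
    fIdxL (l.drop i) i = (l.getD i ' ', (i : Int)) :: fIdxL (l.drop (i + 1)) (i + 1) := by
  rw [List.drop_eq_getElem_cons hi, fIdxL, List.getD_eq_getElem _ ' ' hi]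
  rw [List.getD_eq_getElem _ ' ' hi] at hx
  simp [hx]

theorem loopA_eq (sl el : List Char) (i j : Nat) (hlen : sl.length = el.length) :
    i ≤ sl.length → j ≤ el.length →
    pvLoopA sl el el.length i j = chk (fIdxL (sl.drop i) i) (fIdxL (el.drop j) j) := by
  fun_induction pvLoopA sl el el.length i j with
  | case1 i j ip jp hend =>
    intro hi hj
    have hend' : pvSkipX sl el.length i = pvSkipX el el.length j ∧
        pvSkipX el el.length j = el.length := hend
    show true = chk (fIdxL (sl.drop i) i) (fIdxL (el.drop j) j)
    rw [← skip_fIdx sl el.length i, ← skip_fIdx el el.length j, hend'.1, hend'.2,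
      List.drop_of_length_le (by omega), List.drop_of_length_le (by omega)]
    rfl
  | case2 i j ip jp hne hone =>
    intro hi hj
    have hne' : ¬(pvSkipX sl el.length i = pvSkipX el el.length j ∧
        pvSkipX el el.length j = el.length) := hne
    have hone' : pvSkipX sl el.length i = el.length ∨
        pvSkipX el el.length j = el.length := hone
    show false = chk (fIdxL (sl.drop i) i) (fIdxL (el.drop j) j)
    rw [← skip_fIdx sl el.length i, ← skip_fIdx el el.length j]
    have hsi := pvSkipX_le sl el.length i (by omega)
    have hsj := pvSkipX_le el el.length j hj
    rcases hone' with h | h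
    · have hjn : pvSkipX el el.length j < el.length := by
        rcases Nat.lt_or_ge (pvSkipX el el.length j) el.length with hlt | _
        · exact hlt
        · exact (hne' ⟨by omega, by omega⟩).elim
      have hxj : el.getD (pvSkipX el el.length j) ' ' ≠ 'X' :=
        fun hx => skip_stop el el.length j ⟨hjn, hx⟩
      rw [h, List.drop_of_length_le (by omega), fIdx_cons el _ hjn hxj]
      rfl
    · have hin : pvSkipX sl el.length i < sl.length := by
        rcases Nat.lt_or_ge (pvSkipX sl el.length i) sl.length with hlt | _
        · exact hlt
        · exact (hne' ⟨by omega, by omega⟩).elim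
      have hxi : sl.getD (pvSkipX sl el.length i) ' ' ≠ 'X' :=
        fun hx => skip_stop sl el.length i ⟨by omega, hx⟩
      rw [h, show List.drop el.length el = [] from List.drop_of_length_le (by omega),
        fIdx_cons sl _ hin hxi]
      cases fIdxL (sl.drop (pvSkipX sl el.length i + 1)) (↑(pvSkipX sl el.length i) + 1) <;> rfl
  | case3 i j ip jp hne hone h1 hge ih =>
    intro hi hj
    have hone' : ¬(pvSkipX sl el.length i = el.length ∨
        pvSkipX el el.length j = el.length) := hone
    have h1' : sl.getD (pvSkipX sl el.length i) ' ' = el.getD (pvSkipX el el.length j) ' ' ∧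
        el.getD (pvSkipX el el.length j) ' ' = 'L' := h1
    have hge' : pvSkipX el el.length j ≤ pvSkipX sl el.length i := hge
    have ih' : pvSkipX sl el.length i + 1 ≤ sl.length → pvSkipX el el.length j + 1 ≤ el.length →
        pvLoopA sl el el.length (pvSkipX sl el.length i + 1) (pvSkipX el el.length j + 1)
          = chk (fIdxL (sl.drop (pvSkipX sl el.length i + 1)) (pvSkipX sl el.length i + 1))
                (fIdxL (el.drop (pvSkipX el el.length j + 1)) (pvSkipX el el.length j + 1)) := ih
    show pvLoopA sl el el.length (pvSkipX sl el.length i + 1) (pvSkipX el el.length j + 1)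
      = chk (fIdxL (sl.drop i) i) (fIdxL (el.drop j) j)
    rw [← skip_fIdx sl el.length i, ← skip_fIdx el el.length j]
    have hsi := pvSkipX_le sl el.length i (by omega)
    have hsj := pvSkipX_le el el.length j hj
    have hin : pvSkipX sl el.length i < sl.length := by omega
    have hjn : pvSkipX el el.length j < el.length := by omega
    have hxi : sl.getD (pvSkipX sl el.length i) ' ' ≠ 'X' :=
      fun hx => skip_stop sl el.length i ⟨by omega, hx⟩
    have hxj : el.getD (pvSkipX el el.length j) ' ' ≠ 'X' :=
      fun hx => skip_stop el el.length j ⟨hjn, hx⟩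
    rw [fIdx_cons sl _ hin hxi, fIdx_cons el _ hjn hxj, ih' (by omega) (by omega)]
    simp only [chk]
    rw [if_pos h1']
    have hc : ((pvSkipX el el.length j : Int) ≤ (pvSkipX sl el.length i : Int)) := by
      exact_mod_cast hge'
    simp only [ge_iff_le, hc, decide_true, Bool.true_and]
  | case4 i j ip jp hne hone h1 hge =>
    intro hi hj
    have hone' : ¬(pvSkipX sl el.length i = el.length ∨
        pvSkipX el el.length j = el.length) := hone
    have h1' : sl.getD (pvSkipX sl el.length i) ' ' = el.getD (pvSkipX el el.length j) ' ' ∧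
        el.getD (pvSkipX el el.length j) ' ' = 'L' := h1
    have hge' : ¬ pvSkipX el el.length j ≤ pvSkipX sl el.length i := hge
    show false = chk (fIdxL (sl.drop i) i) (fIdxL (el.drop j) j)
    rw [← skip_fIdx sl el.length i, ← skip_fIdx el el.length j]
    have hsi := pvSkipX_le sl el.length i (by omega)
    have hsj := pvSkipX_le el el.length j hj
    have hin : pvSkipX sl el.length i < sl.length := by omega
    have hjn : pvSkipX el el.length j < el.length := by omega
    have hxi : sl.getD (pvSkipX sl el.length i) ' ' ≠ 'X' :=
      fun hx => skip_stop sl el.length i ⟨by omega, hx⟩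
    have hxj : el.getD (pvSkipX el el.length j) ' ' ≠ 'X' :=
      fun hx => skip_stop el el.length j ⟨hjn, hx⟩
    rw [fIdx_cons sl _ hin hxi, fIdx_cons el _ hjn hxj]
    simp only [chk]
    rw [if_pos h1']
    have hc : ¬ ((pvSkipX el el.length j : Int) ≤ (pvSkipX sl el.length i : Int)) := by
      exact_mod_cast hge'
    simp [hc]
  | case5 i j ip jp hne hone h1 h2 hle ih =>
    intro hi hj
    have hone' : ¬(pvSkipX sl el.length i = el.length ∨
        pvSkipX el el.length j = el.length) := hone
    have h1' : ¬(sl.getD (pvSkipX sl el.length i) ' ' = el.getD (pvSkipX el el.length j) ' ' ∧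
        el.getD (pvSkipX el el.length j) ' ' = 'L') := h1
    have h2' : sl.getD (pvSkipX sl el.length i) ' ' = el.getD (pvSkipX el el.length j) ' ' ∧
        el.getD (pvSkipX el el.length j) ' ' = 'R' := h2
    have hle' : pvSkipX sl el.length i ≤ pvSkipX el el.length j := hle
    have ih' : pvSkipX sl el.length i + 1 ≤ sl.length → pvSkipX el el.length j + 1 ≤ el.length →
        pvLoopA sl el el.length (pvSkipX sl el.length i + 1) (pvSkipX el el.length j + 1)
          = chk (fIdxL (sl.drop (pvSkipX sl el.length i + 1)) (pvSkipX sl el.length i + 1))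
                (fIdxL (el.drop (pvSkipX el el.length j + 1)) (pvSkipX el el.length j + 1)) := ih
    show pvLoopA sl el el.length (pvSkipX sl el.length i + 1) (pvSkipX el el.length j + 1)
      = chk (fIdxL (sl.drop i) i) (fIdxL (el.drop j) j)
    rw [← skip_fIdx sl el.length i, ← skip_fIdx el el.length j]
    have hsi := pvSkipX_le sl el.length i (by omega)
    have hsj := pvSkipX_le el el.length j hj
    have hin : pvSkipX sl el.length i < sl.length := by omega
    have hjn : pvSkipX el el.length j < el.length := by omega
    have hxi : sl.getD (pvSkipX sl el.length i) ' ' ≠ 'X' :=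
      fun hx => skip_stop sl el.length i ⟨by omega, hx⟩
    have hxj : el.getD (pvSkipX el el.length j) ' ' ≠ 'X' :=
      fun hx => skip_stop el el.length j ⟨hjn, hx⟩
    rw [fIdx_cons sl _ hin hxi, fIdx_cons el _ hjn hxj, ih' (by omega) (by omega)]
    simp only [chk]
    rw [if_neg h1', if_pos h2']
    have hc : ((pvSkipX sl el.length i : Int) ≤ (pvSkipX el el.length j : Int)) := by
      exact_mod_cast hle'
    simp only [hc, decide_true, Bool.true_and]
  | case6 i j ip jp hne hone h1 h2 hle =>
    intro hi hj
    have hone' : ¬(pvSkipX sl el.length i = el.length ∨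
        pvSkipX el el.length j = el.length) := hone
    have h1' : ¬(sl.getD (pvSkipX sl el.length i) ' ' = el.getD (pvSkipX el el.length j) ' ' ∧
        el.getD (pvSkipX el el.length j) ' ' = 'L') := h1
    have h2' : sl.getD (pvSkipX sl el.length i) ' ' = el.getD (pvSkipX el el.length j) ' ' ∧
        el.getD (pvSkipX el el.length j) ' ' = 'R' := h2
    have hle' : ¬ pvSkipX sl el.length i ≤ pvSkipX el el.length j := hle
    show false = chk (fIdxL (sl.drop i) i) (fIdxL (el.drop j) j)
    rw [← skip_fIdx sl el.length i, ← skip_fIdx el el.length j]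
    have hsi := pvSkipX_le sl el.length i (by omega)
    have hsj := pvSkipX_le el el.length j hj
    have hin : pvSkipX sl el.length i < sl.length := by omega
    have hjn : pvSkipX el el.length j < el.length := by omega
    have hxi : sl.getD (pvSkipX sl el.length i) ' ' ≠ 'X' :=
      fun hx => skip_stop sl el.length i ⟨by omega, hx⟩
    have hxj : el.getD (pvSkipX el el.length j) ' ' ≠ 'X' :=
      fun hx => skip_stop el el.length j ⟨hjn, hx⟩
    rw [fIdx_cons sl _ hin hxi, fIdx_cons el _ hjn hxj]
    simp only [chk]
    rw [if_neg h1', if_pos h2']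
    have hc : ¬ ((pvSkipX sl el.length i : Int) ≤ (pvSkipX el el.length j : Int)) := by
      exact_mod_cast hle'
    simp [hc]
  | case7 i j ip jp hne hone h1 h2 =>
    intro hi hj
    have hone' : ¬(pvSkipX sl el.length i = el.length ∨
        pvSkipX el el.length j = el.length) := hone
    have h1' : ¬(sl.getD (pvSkipX sl el.length i) ' ' = el.getD (pvSkipX el el.length j) ' ' ∧
        el.getD (pvSkipX el el.length j) ' ' = 'L') := h1
    have h2' : ¬(sl.getD (pvSkipX sl el.length i) ' ' = el.getD (pvSkipX el el.length j) ' ' ∧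
        el.getD (pvSkipX el el.length j) ' ' = 'R') := h2
    show false = chk (fIdxL (sl.drop i) i) (fIdxL (el.drop j) j)
    rw [← skip_fIdx sl el.length i, ← skip_fIdx el el.length j]
    have hsi := pvSkipX_le sl el.length i (by omega)
    have hsj := pvSkipX_le el el.length j hj
    have hin : pvSkipX sl el.length i < sl.length := by omega
    have hjn : pvSkipX el el.length j < el.length := by omega
    have hxi : sl.getD (pvSkipX sl el.length i) ' ' ≠ 'X' :=
      fun hx => skip_stop sl el.length i ⟨by omega, hx⟩
    have hxj : el.getD (pvSkipX el el.length j) ' ' ≠ 'X' :=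
      fun hx => skip_stop el el.length j ⟨hjn, hx⟩
    rw [fIdx_cons sl _ hin hxi, fIdx_cons el _ hjn hxj]
    simp only [chk]
    rw [if_neg h1', if_neg h2']

theorem chk_eq (S T : List (Char × Int)) :
    chk S T = ((S.length == T.length) && (S.zip T).all (fun q =>
      if q.1.1 ≠ q.2.1 then false
      else if q.1.1 = 'L' then (if q.1.2 < q.2.2 then false else true)
      else if q.1.1 = 'R' then (if q.1.2 > q.2.2 then false else true)
      else false)) := by
  induction S generalizing T with
  | nil => cases T <;> simp [chk]
  | cons p S ih =>
    cases T with
    | nil => simp [chk]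
    | cons q T =>
      obtain ⟨cs, si⟩ := p
      obtain ⟨ce, ei⟩ := q
      simp only [chk, List.zip_cons_cons, List.all_cons, List.length_cons, ih]
      by_cases hce : cs = ce
      · subst hce
        by_cases hL : cs = 'L'
        · subst hL
          by_cases hlt : si < ei
          · have hge : ¬ (ei ≤ si) := by omega
            simp [hlt, hge]
          · have hge : ei ≤ si := by omega
            simp [hlt, hge]
        · by_cases hR : cs = 'R'
          · subst hR
            by_cases hlt : ei < si
            · have hle : ¬ (si ≤ ei) := by omega
              simp [hlt, hle, hL]
            · have hle : si ≤ ei := by omega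
              simp [hlt, hle, hL]
          · simp [hL, hR]
      · simp [hce]

-- ===== VERDICT (by name: the statement is the Claim_ definition above) =====
theorem canTransform2_spec : Claim_equal_canTransform2 := by
  unfold Claim_equal_canTransform2
  intro start end_ _
  unfold Spec_canTransform2 canTransform2 canTransform2_alt
  by_cases hl : start.toList.length = end_.toList.length
  · have hne : ¬ (start.toList.length ≠ end_.toList.length) := fun h => h hl
    simp only [if_neg hne]
    rw [show pvLoopA start.toList end_.toList end_.toList.length 0 0
          = chk (fIdxL (start.toList.drop 0) 0) (fIdxL (end_.toList.drop 0) 0) from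
        loopA_eq _ _ 0 0 hl (by omega) (by omega)]
    rw [List.drop_zero, List.drop_zero, chk_eq,
      ← enumFilt start.toList 0, ← enumFilt end_.toList 0]
    by_cases hst : (List.filterMap pvPick (PySem.List.enumerate start.toList 0)).length
        = (List.filterMap pvPick (PySem.List.enumerate end_.toList 0)).length
    · have h1 : ((List.filterMap pvPick (PySem.List.enumerate start.toList 0)).length
          == (List.filterMap pvPick (PySem.List.enumerate end_.toList 0)).length) = true := by
        simpa using hst
      have h2 : ¬ ((List.filterMap pvPick (PySem.List.enumerate start.toList 0)).length
          ≠ (List.filterMap pvPick (PySem.List.enumerate end_.toList 0)).length) :=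
        fun h => h hst
      rw [h1, if_neg h2, Bool.true_and]
    · have h1 : ((List.filterMap pvPick (PySem.List.enumerate start.toList 0)).length
          == (List.filterMap pvPick (PySem.List.enumerate end_.toList 0)).length) = false := by
        simpa using hst
      rw [h1, if_pos hst, Bool.false_and]
  · simp only [if_pos hl]
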